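-- pv_equiv track=rewrite | github.com/aapw01/AI-JinShu | app/tasks/generation.py | _volume_chunks
-- ===== SOURCE A (Python) =====
-- def _volume_chunks(start_chapter: int, num_chapters: int, volume_size: int) -> list[tuple[int, int, int]]:
--     """Return [(volume_no, chunk_start, chunk_len), ...]."""
--     volume_size = max(1, int(volume_size or 30))
--     chunks: list[tuple[int, int, int]] = []
--     remaining = max(0, int(num_chapters))
--     current = int(start_chapter)
--     idx = 0
--     while remaining > 0:
--         chunk_len = min(volume_size, remaining)
--         volume_no = (idx // 1) + 1
--         chunks.append((volume_no, current, chunk_len))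
--         current += chunk_len
--         remaining -= chunk_len
--         idx += 1
--     return chunks
-- ===== SOURCE B (Python) =====
-- def _volume_chunks(start_chapter: int, num_chapters: int, volume_size: int) -> list[tuple[int, int, int]]:
--     """Return [(volume_no, chunk_start, chunk_len), ...] via closed-form chunk count."""
--     vsize = max(1, int(volume_size or 30))
--     total = max(0, int(num_chapters))
--     start = int(start_chapter)
--     num_vols = (total + vsize - 1) // vsize
--     return [(i + 1, start + i * vsize, min(vsize, total - i * vsize)) for i in range(num_vols)]
-- ===== Notes on version B (the rewrite author's own statement) =====
-- stated objective: alternative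
-- what changed: Replaced the while loop threading remaining/current/idx accumulators by a closed-form chunk count num_vols = ceil(total/vsize) and a comprehension deriving each tuple by index arithmetic.
import Mathlib
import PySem

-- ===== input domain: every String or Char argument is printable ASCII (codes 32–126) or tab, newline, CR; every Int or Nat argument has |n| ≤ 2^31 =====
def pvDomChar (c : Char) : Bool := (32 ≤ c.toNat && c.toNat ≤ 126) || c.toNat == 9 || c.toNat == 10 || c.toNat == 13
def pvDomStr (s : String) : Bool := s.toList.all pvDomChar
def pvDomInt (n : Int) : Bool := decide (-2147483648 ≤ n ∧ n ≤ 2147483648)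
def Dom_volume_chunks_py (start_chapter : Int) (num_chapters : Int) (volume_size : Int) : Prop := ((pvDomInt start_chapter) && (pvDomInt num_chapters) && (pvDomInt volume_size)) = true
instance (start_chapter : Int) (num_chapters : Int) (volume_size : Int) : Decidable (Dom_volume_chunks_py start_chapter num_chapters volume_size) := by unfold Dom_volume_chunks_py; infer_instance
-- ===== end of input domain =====

-- B replaces A's accumulator while-loop by a closed-form chunk count and index arithmetic (alternative decomposition, same cost).

-- ===== PORT A =====
-- the while loop of A: state (remaining, current, idx); vsize carries the proof 1 ≤ vsize
-- (A always calls it with vsize = max(1, …)), which the loop needs to terminate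
def volumeChunksLoop (vsize : Int) (hv : 1 ≤ vsize) (remaining current idx : Int) :
    List (Int × Int × Int) :=
  if _h : remaining > 0 then
    let chunk_len := min vsize remaining
    let volume_no := PySem.Int.floordiv idx 1 + 1
    (volume_no, current, chunk_len) ::
      volumeChunksLoop vsize hv (remaining - chunk_len) (current + chunk_len) (idx + 1)
  else
    []
termination_by remaining.toNat
decreasing_by omega

def volume_chunks_py (start_chapter : Int) (num_chapters : Int) (volume_size : Int) :
    List (Int × Int × Int) :=
  let vsize := max 1 (if volume_size = 0 then 30 else volume_size)
  volumeChunksLoop vsize (le_max_left 1 _) (max 0 num_chapters) start_chapter 0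

-- ===== PORT B =====
def volume_chunks_py_alt (start_chapter : Int) (num_chapters : Int) (volume_size : Int) :
    List (Int × Int × Int) :=
  let vsize := max 1 (if volume_size = 0 then 30 else volume_size)
  let total := max 0 num_chapters
  let num_vols := PySem.Int.floordiv (total + vsize - 1) vsize
  (PySem.List.pyRange 0 num_vols 1).map
    (fun i => (i + 1, start_chapter + i * vsize, min vsize (total - i * vsize)))

-- ===== PRECONDITION & SPEC =====
def Spec_volume_chunks_py (start_chapter : Int) (num_chapters : Int) (volume_size : Int)
    (out : List (Int × Int × Int)) : Prop :=
  out = volume_chunks_py_alt start_chapter num_chapters volume_size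

instance (start_chapter : Int) (num_chapters : Int) (volume_size : Int)
    (out : List (Int × Int × Int)) :
    Decidable (Spec_volume_chunks_py start_chapter num_chapters volume_size out) := by
  unfold Spec_volume_chunks_py; infer_instance

-- ===== CLAIM =====
def Claim_equal_volume_chunks_py : Prop :=
  ∀ (start_chapter : Int) (num_chapters : Int) (volume_size : Int),
    Dom_volume_chunks_py start_chapter num_chapters volume_size →
    Spec_volume_chunks_py start_chapter num_chapters volume_size
      (volume_chunks_py start_chapter num_chapters volume_size)

-- ===== LEMMAS AND PROOFS =====

lemma volumeChunksLoop_eq (vsize : Int) (hv : 1 ≤ vsize) :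
    ∀ (n : Nat) (remaining : Int), remaining.toNat ≤ n → 0 ≤ remaining →
      ∀ (current idx : Int),
        volumeChunksLoop vsize hv remaining current idx =
          (List.range (PySem.Int.floordiv (remaining + vsize - 1) vsize).toNat).map
            (fun k : Nat =>
              (idx + (k : Int) + 1, current + (k : Int) * vsize,
               min vsize (remaining - (k : Int) * vsize))) := by
  intro n
  induction n with
  | zero =>
    intro remaining hle h0 current idx
    have hr : remaining = 0 := by omega
    subst hr
    rw [volumeChunksLoop]
    have hq : PySem.Int.floordiv (vsize - 1) vsize = 0 := by
      rw [PySem.Int.floordiv_eq_iff_of_pos (by omega)]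
      omega
    simp [hq]
  | succ n ih =>
    intro remaining hle h0 current idx
    by_cases hpos : remaining > 0
    · rw [volumeChunksLoop]
      simp only [hpos, dite_true]
      set c := min vsize remaining with hc
      have hc1 : 1 ≤ c := by omega
      -- chunk count is one more than the chunk count of the rest
      have hquot : (PySem.Int.floordiv (remaining + vsize - 1) vsize).toNat =
          (PySem.Int.floordiv ((remaining - c) + vsize - 1) vsize).toNat + 1 := by
        by_cases hlt : remaining < vsize
        · have h1 : PySem.Int.floordiv (remaining + vsize - 1) vsize = 1 := by
            rw [PySem.Int.floordiv_eq_iff_of_pos (by omega)]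
            constructor <;> omega
          have hc' : c = remaining := by omega
          have h2 : PySem.Int.floordiv ((remaining - c) + vsize - 1) vsize = 0 := by
            rw [PySem.Int.floordiv_eq_iff_of_pos (by omega)]
            constructor <;> omega
          omega
        · have hc' : c = vsize := by omega
          rw [hc']
          have e1 : remaining - vsize + vsize - 1 = (remaining + vsize - 1) + (-1) * vsize := by
            ring
          rw [e1, PySem.Int.floordiv_eq_ediv_of_pos (by omega),
              PySem.Int.floordiv_eq_ediv_of_pos (by omega),
              Int.add_mul_ediv_right _ _ (by omega : vsize ≠ 0)]
          have hnn : 0 ≤ (remaining - vsize + vsize - 1) / vsize :=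
            Int.ediv_nonneg (by omega) (by omega)
          have e2 : remaining - vsize + vsize - 1 = (remaining + vsize - 1) + (-1) * vsize := by
            ring
          rw [e2, Int.add_mul_ediv_right _ _ (by omega : vsize ≠ 0)] at hnn
          omega
      rw [hquot, List.range_succ_eq_map, List.map_cons, List.map_map]
      have hrec := ih (remaining - c) (by omega) (by omega) (current + c) (idx + 1)
      rw [hrec]
      congr 1
      · simp
        omega
      · apply List.map_congr_left
        intro k hk
        by_cases hlt : remaining < vsize
        · -- in this case the rest is empty: k's membership is contradictory
          have hc' : c = remaining := by omega
          have h2 : PySem.Int.floordiv ((remaining - c) + vsize - 1) vsize = 0 := by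
            rw [PySem.Int.floordiv_eq_iff_of_pos (by omega)]
            constructor <;> omega
          rw [h2] at hk
          simp at hk
        · have hc' : c = vsize := by omega
          simp only [Function.comp]
          refine Prod.ext ?_ (Prod.ext ?_ ?_)
          · simp; ring
          · simp; rw [hc']; ring
          · simp; rw [hc']; congr 1; ring
    · rw [volumeChunksLoop]
      have hr : remaining = 0 := by omega
      subst hr
      have hq : PySem.Int.floordiv (vsize - 1) vsize = 0 := by
        rw [PySem.Int.floordiv_eq_iff_of_pos (by omega)]
        omega
      simp [hq]

-- ===== VERDICT =====
theorem volume_chunks_py_spec : Claim_equal_volume_chunks_py := by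
  intro start_chapter num_chapters volume_size _
  unfold Spec_volume_chunks_py
  simp only [volume_chunks_py, volume_chunks_py_alt]
  have hv1 : 1 ≤ max 1 (if volume_size = 0 then 30 else volume_size) := le_max_left 1 _
  rw [volumeChunksLoop_eq _ hv1 (max 0 num_chapters).toNat (max 0 num_chapters) le_rfl
        (le_max_left 0 _) start_chapter 0]
  rw [PySem.List.pyRange_one, List.map_map]
  rw [show (PySem.Int.floordiv (max 0 num_chapters + max 1 (if volume_size = 0 then 30 else volume_size) - 1)
        (max 1 (if volume_size = 0 then 30 else volume_size)) - 0) =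
      PySem.Int.floordiv (max 0 num_chapters + max 1 (if volume_size = 0 then 30 else volume_size) - 1)
        (max 1 (if volume_size = 0 then 30 else volume_size)) from by ring]
  apply List.map_congr_left
  intro k _
  simp
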